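-- pv_equiv track=rewrite | github.com/FaheemMs/practice | Easy/Make the array beautiful/make-the-array-beautiful.py | makeBeautiful
-- ===== SOURCE A (Python) =====
-- from typing import List
--
-- def makeBeautiful(arr: List[int]) -> List[int]:
--     if len(arr) <= 1:
--         return arr
--     res = []
--     for i in range(len(arr)):
--         if len(res) == 0:
--             res.append(arr[i])
--         elif (res[-1] >= 0 and arr[i] < 0 ) or (res[-1] < 0 and arr[i] >= 0):
--             res.pop()
--         else:
--             res.append(arr[i])
--     return res
-- ===== SOURCE B (Python) =====
-- from typing import List
--
-- def makeBeautiful(arr: List[int]) -> List[int]: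
--     res = list(arr)
--     changed = True
--     while changed:
--         changed = False
--         for i in range(len(res) - 1):
--             if (res[i] >= 0) != (res[i + 1] >= 0):
--                 del res[i + 1]
--                 del res[i]
--                 changed = True
--                 break
--     return res
-- ===== Notes on version B (the rewrite author's own statement) =====
-- stated objective: alternative
-- what changed: Replaced the single left-to-right stack pass by repeated scans that delete the leftmost adjacent opposite-sign pair and restart until no such pair remains.
import Mathlib
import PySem

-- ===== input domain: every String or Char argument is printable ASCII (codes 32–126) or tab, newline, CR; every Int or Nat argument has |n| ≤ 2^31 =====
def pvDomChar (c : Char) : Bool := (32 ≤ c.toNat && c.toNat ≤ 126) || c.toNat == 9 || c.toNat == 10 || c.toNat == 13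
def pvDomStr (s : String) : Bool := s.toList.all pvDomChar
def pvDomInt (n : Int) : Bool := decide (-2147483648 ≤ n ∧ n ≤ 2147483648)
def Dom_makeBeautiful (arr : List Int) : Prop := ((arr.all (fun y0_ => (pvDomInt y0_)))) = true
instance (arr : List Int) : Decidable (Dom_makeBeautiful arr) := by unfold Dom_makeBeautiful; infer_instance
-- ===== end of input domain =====

-- B replaces A's single stack pass by repeated leftmost adjacent opposite-sign pair deletion; alternative decomposition, same results.


-- ===== PORT A =====
-- body of A's loop: append when res empty, pop on opposite sign of res[-1] vs arr[i], else append
def aStep (res : List Int) (x : Int) : List Int :=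
  if res.length = 0 then res ++ [x]
  else if (res.getLast! ≥ 0 ∧ x < 0) ∨ (res.getLast! < 0 ∧ x ≥ 0) then res.dropLast
  else res ++ [x]

def makeBeautiful (arr : List Int) : List Int :=
  if arr.length ≤ 1 then arr
  else arr.foldl aStep []

-- ===== PORT B =====
-- one inner for-scan of B: delete the leftmost adjacent opposite-sign pair (none if absent)
def bScan : List Int → Option (List Int)
  | [] => none
  | [_] => none
  | a :: b :: t =>
      if (decide (a ≥ 0)) ≠ (decide (b ≥ 0)) then some t
      else (bScan (b :: t)).map (a :: ·)

theorem bScan_length : ∀ {l l' : List Int}, bScan l = some l' → l'.length + 2 = l.length := by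
  intro l
  induction l with
  | nil => intro l' h; simp [bScan] at h
  | cons a t ih =>
    match t with
    | [] => intro l' h; simp [bScan] at h
    | b :: t' =>
      intro l' h
      simp only [bScan] at h
      split at h
      · cases h; simp
      · cases hs : bScan (b :: t') with
        | none => simp [hs] at h
        | some u =>
          simp [hs] at h
          have := ih hs
          subst h
          simp only [List.length_cons] at this ⊢
          omega

-- B's while loop: repeat the scan until no pair is deleted
def bLoop (l : List Int) : List Int :=
  match h : bScan l with
  | none => l
  | some l' => bLoop l'
termination_by l.length
decreasing_by have := bScan_length h; omega

def makeBeautiful_alt (arr : List Int) : List Int := bLoop arr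

-- ===== PRECONDITION & SPEC =====
def Spec_makeBeautiful (arr : List Int) (out : List Int) : Prop := out = makeBeautiful_alt arr
instance (arr : List Int) (out : List Int) : Decidable (Spec_makeBeautiful arr out) := by unfold Spec_makeBeautiful; infer_instance

-- ===== CLAIM (what is proved, stated in full; the proofs are below) =====
def Claim_equal_makeBeautiful : Prop := ∀ (arr : List Int), Dom_makeBeautiful arr → Spec_makeBeautiful arr (makeBeautiful arr)

-- ===== LEMMAS AND PROOFS =====

theorem aStep_snoc (acc : List Int) (a x : Int) :
    aStep (acc ++ [a]) x =
      if (decide (a ≥ 0)) ≠ (decide (x ≥ 0)) then acc else acc ++ [a, x] := by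
  have hg : (acc ++ [a]).getLast! = a :=
    List.getLast!_of_getLast? List.getLast?_concat
  have hd : (acc ++ [a]).dropLast = acc := List.dropLast_concat
  have hne : (decide (a ≥ 0) ≠ decide (x ≥ 0)) ↔ ¬((a ≥ 0) ↔ (x ≥ 0)) :=
    not_congr decide_eq_decide
  unfold aStep
  rw [if_neg (by simp), hg, hd]
  by_cases hax : (a ≥ 0) ↔ (x ≥ 0)
  · rw [if_neg (by omega), if_neg (by simp [hax])]
    simp
  · rw [if_pos (by omega), if_pos (hne.mpr hax)]

-- If the inner scan finds no pair (bScan = none) the stack never pops: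
-- foldl over l with a sign-compatible accumulator just appends l.
theorem fold_nopair : ∀ (l : List Int) (acc : List Int),
    bScan l = none →
    (acc = [] ∨ l = [] ∨ ∃ u a, acc = u ++ [a] ∧ (decide (a ≥ 0)) = (decide (l.head! ≥ 0))) →
    List.foldl aStep acc l = acc ++ l := by
  intro l
  induction l with
  | nil => intro acc _ _; simp
  | cons x t ih =>
    intro acc hnone hcomp
    have hx : aStep acc x = acc ++ [x] := by
      rcases hcomp with h | h | ⟨u, a, rfl, hsg⟩
      · subst h; rfl
      · simp at h
      · rw [aStep_snoc]
        simp only [List.head!] at hsg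
        rw [if_neg (by simp [hsg]), List.append_assoc]
        rfl
    have ht : bScan t = none := by
      match t with
      | [] => rfl
      | b :: t' =>
        simp only [bScan] at hnone
        split at hnone
        · exact absurd hnone (by simp)
        · cases hs : bScan (b :: t') with
          | none => rfl
          | some u => simp [hs] at hnone
    have hcomp' : acc ++ [x] = [] ∨ t = [] ∨
        ∃ u a, acc ++ [x] = u ++ [a] ∧ (decide (a ≥ 0)) = (decide (t.head! ≥ 0)) := by
      match t with
      | [] => right; left; rfl
      | b :: t' =>
        right; right
        refine ⟨acc, x, rfl, ?_⟩
        simp only [bScan] at hnone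
        split at hnone
        · exact absurd hnone (by simp)
        · next hch => simpa [List.head!] using not_ne_iff.mp hch
    calc List.foldl aStep acc (x :: t) = List.foldl aStep (acc ++ [x]) t := by
          simp [List.foldl_cons, hx]
      _ = (acc ++ [x]) ++ t := ih _ ht hcomp'
      _ = acc ++ x :: t := by simp

-- Deleting the leftmost adjacent opposite-sign pair does not change the stack fold,
-- for any sign-compatible accumulator.
theorem fold_scan : ∀ (l l' : List Int) (acc : List Int),
    bScan l = some l' →
    (acc = [] ∨ ∃ u a, acc = u ++ [a] ∧ (decide (a ≥ 0)) = (decide (l.head! ≥ 0))) →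
    List.foldl aStep acc l = List.foldl aStep acc l' := by
  intro l
  induction l with
  | nil => intro l' acc h _; simp [bScan] at h
  | cons a t ih =>
    match t with
    | [] => intro l' acc h _; simp [bScan] at h
    | b :: t' =>
      intro l' acc h hcomp
      have hx : aStep acc a = acc ++ [a] := by
        rcases hcomp with rfl | ⟨u, c, rfl, hsg⟩
        · rfl
        · rw [aStep_snoc, if_neg (by simpa [List.head!] using hsg)]
          simp
      simp only [bScan] at h
      split at h
      · next hne =>
        cases h
        have hb : aStep (acc ++ [a]) b = acc := by
          rw [aStep_snoc, if_pos hne]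
        simp [List.foldl_cons, hx, hb]
      · next hne =>
        have hsg : (decide (a ≥ 0)) = (decide (b ≥ 0)) := not_ne_iff.mp hne
        cases hs : bScan (b :: t') with
        | none => simp [hs] at h
        | some u =>
          simp only [hs, Option.map_some] at h
          cases h
          have ihr := ih u (acc ++ [a]) hs
            (Or.inr ⟨acc, a, rfl, by simpa [List.head!] using hsg⟩)
          have hx' : aStep acc a = acc ++ [a] := hx
          simp only [List.foldl_cons, hx']
          exact ihr

theorem fold_eq_bLoop : ∀ (l : List Int), List.foldl aStep [] l = bLoop l := by
  intro l
  induction hn : l.length using Nat.strong_induction_on generalizing l with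
  | _ n ih =>
    cases hs : bScan l with
    | none =>
      rw [bLoop, hs]
      exact (fold_nopair l [] hs (Or.inl rfl)).trans (by simp)
    | some l' =>
      rw [bLoop, hs]
      have hlen := bScan_length hs
      rw [fold_scan l l' [] hs (Or.inl rfl)]
      exact ih l'.length (by omega) l' rfl

-- ===== VERDICT (by name: the statement is the Claim_ definition above) =====
theorem makeBeautiful_spec : Claim_equal_makeBeautiful := by
  intro arr _
  unfold Spec_makeBeautiful makeBeautiful makeBeautiful_alt
  rw [← fold_eq_bLoop]
  split
  · next hle =>
    match arr, hle with
    | [], _ => rfl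
    | [a], _ => simp [List.foldl, aStep]
  · rfl
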